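-- pv_equiv track=rewrite | github.com/marcosherreroa/Algebra-Computacional | Entregas/Entrega3/actividad3_Marcos_Herrero.py | es_posible_ganar_con_n_piedras
-- ===== SOURCE A (Python) =====
-- def es_posible_ganar_con_n_piedras(n):
--     posible = (n+1)*[False]
--
--     # Resolvemos el problema para todo m entre 1 y n. Vamos de menor a mayor, ya que
--     # cada instancia solo requiere soluciones de problemas con número menor de piedras
--     ## El caso base posible[1] ya está a False
--     for i in range(2,n+1):
--         if not posible[i-1]:  # quitas 1 piedra y el otro no tiene estategia ganadora
--             posible[i] = True
--
--         elif i > 2 and not posible[i-2]: # quitas 2 piedras y el otro no tiene estrategia ganadora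
--             posible[i] = True
--
--         elif i > 6 and not posible[i-6]: # quitas 6 piedras y el otro no tiene estrategia ganadora
--             posible[i] = True
--
--     return posible[n]
-- ===== SOURCE B (Python) =====
-- def es_posible_ganar_con_n_piedras(n):
--     # Closed form for the {1,2,6}-subtraction game: the losing positions are
--     # exactly n == 0 and n % 7 in (1, 4); every other n is winning.
--     return n != 0 and n % 7 not in (1, 4)
-- ===== Notes on version B (the rewrite author's own statement) =====
-- stated objective: faster
-- what changed: Replaces the O(n) dynamic-programming table over all positions up to n by the closed form: a position is losing exactly when n == 0 or n mod 7 is 1 or 4.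
import Mathlib
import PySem

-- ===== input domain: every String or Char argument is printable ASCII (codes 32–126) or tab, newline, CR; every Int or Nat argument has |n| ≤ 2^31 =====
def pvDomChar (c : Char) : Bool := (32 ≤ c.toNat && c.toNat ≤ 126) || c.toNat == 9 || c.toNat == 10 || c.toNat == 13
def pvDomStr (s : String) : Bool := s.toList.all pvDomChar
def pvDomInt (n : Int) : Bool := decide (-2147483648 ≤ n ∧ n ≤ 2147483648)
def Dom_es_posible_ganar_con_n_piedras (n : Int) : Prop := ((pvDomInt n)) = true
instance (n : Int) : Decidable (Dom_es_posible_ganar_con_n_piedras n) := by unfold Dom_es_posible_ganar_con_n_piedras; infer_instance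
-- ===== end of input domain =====

-- B replaces A's O(n) DP table by the O(1) closed form (losing iff n = 0 or n mod 7 ∈ {1,4}).

-- ===== PORT A =====
-- loop body of A; the table is an Array (Python's list with in-place assignment).
-- All reads and the write are in range whenever the Python performs them (2 ≤ i ≤ n and
-- the guards i > 2 / i > 6 precede the reads), so '.getD … false' / 'setIfInBounds'
-- never supply a value or drop a write the Python did not.
def pvALoop (p : Array Bool) (i : Int) : Array Bool :=
  if (p.getD (i-1).toNat false) = false then p.setIfInBounds i.toNat true
  else if 2 < i ∧ (p.getD (i-2).toNat false) = false then p.setIfInBounds i.toNat true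
  else if 6 < i ∧ (p.getD (i-6).toNat false) = false then p.setIfInBounds i.toNat true
  else p

def es_posible_ganar_con_n_piedras (n : Int) : Bool :=
  let posible := Array.replicate (n+1).toNat false
  let posible := (PySem.List.pyRange 2 (n+1) 1).foldl pvALoop posible
  posible.getD n.toNat false

-- ===== PORT B =====
def es_posible_ganar_con_n_piedras_alt (n : Int) : Bool :=
  decide (n ≠ 0 ∧ PySem.Int.mod n 7 ≠ 1 ∧ PySem.Int.mod n 7 ≠ 4)

-- ===== PRECONDITION & SPEC =====
-- Pre_: A raises IndexError for n < 0 (the table (n+1)*[False] is empty then and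
-- posible[n] is read); B returns the closed-form value there instead.
def Pre_es_posible_ganar_con_n_piedras (n : Int) : Prop := 0 ≤ n
instance (n : Int) : Decidable (Pre_es_posible_ganar_con_n_piedras n) := by unfold Pre_es_posible_ganar_con_n_piedras; infer_instance
def pvWitness_es_posible_ganar_con_n_piedras : Int := 9

def Spec_es_posible_ganar_con_n_piedras (n : Int) (out : Bool) : Prop := out = es_posible_ganar_con_n_piedras_alt n
instance (n : Int) (out : Bool) : Decidable (Spec_es_posible_ganar_con_n_piedras n out) := by unfold Spec_es_posible_ganar_con_n_piedras; infer_instance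

-- ===== CLAIM (what is proved, stated in full; the proofs are below) =====
def Claim_equal_es_posible_ganar_con_n_piedras : Prop := ∀ (n : Int), Dom_es_posible_ganar_con_n_piedras n → Pre_es_posible_ganar_con_n_piedras n → Spec_es_posible_ganar_con_n_piedras n (es_posible_ganar_con_n_piedras n)

-- ===== LEMMAS AND PROOFS =====

-- the closed form over Nat
def pvG (j : Nat) : Bool := decide (j ≠ 0 ∧ j % 7 ≠ 1 ∧ j % 7 ≠ 4)

-- one iteration of A's loop: it writes exactly the closed-form value at index m+1
theorem pvStep (N m : Nat) (l : Array Bool) (hm : 1 ≤ m) (hmN : m + 1 ≤ N)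
    (hlen : l.size = N+1)
    (hj : ∀ j : Nat, j ≤ m → l[j]? = some (pvG j))
    (hhi : ∀ j : Nat, m < j → j < N+1 → l[j]? = some false) :
    (pvALoop l ((m:Int)+1)).size = N+1 ∧
    (∀ j : Nat, j ≤ m+1 → (pvALoop l ((m:Int)+1))[j]? = some (pvG j)) ∧
    (∀ j : Nat, m+1 < j → j < N+1 → (pvALoop l ((m:Int)+1))[j]? = some false) := by
  have etn : ((m:Int)+1).toNat = m+1 := by omega
  have r1 : l.getD ((m:Int)+1-1).toNat false = pvG m := by
    rw [show (((m:Int)+1-1)).toNat = m by omega, Array.getD_eq_getD_getElem?, hj m le_rfl]; rfl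
  have r2 : l.getD ((m:Int)+1-2).toNat false = pvG (m-1) := by
    rw [show (((m:Int)+1-2)).toNat = m-1 by omega, Array.getD_eq_getD_getElem?,
        hj (m-1) (by omega)]; rfl
  have r3 : l.getD ((m:Int)+1-6).toNat false = pvG (m-5) := by
    rw [show (((m:Int)+1-6)).toNat = m-5 by omega, Array.getD_eq_getD_getElem?,
        hj (m-5) (by omega)]; rfl
  have hset : l = l.setIfInBounds (m+1) false := by
    apply Array.ext_getElem?
    intro i
    rw [Array.getElem?_setIfInBounds]
    by_cases hi : m+1 = i
    · subst hi
      rw [if_pos rfl, if_pos (by omega)]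
      exact hhi (m+1) (by omega) (by omega)
    · rw [if_neg hi]
  have key : pvALoop l ((m:Int)+1) = l.setIfInBounds (m+1) (pvG (m+1)) := by
    unfold pvALoop
    rw [r1, r2, r3, etn]
    split_ifs with c1 c2 c3
    · have hv : pvG (m+1) = true := by
        simp only [pvG, decide_eq_false_iff_not, decide_eq_true_eq, not_and, not_not] at c1 ⊢
        omega
      rw [hv]
    · have hv : pvG (m+1) = true := by
        simp only [pvG, decide_eq_false_iff_not, decide_eq_true_eq, not_and, not_not] at c1 c2 ⊢
        omega
      rw [hv]
    · have hv : pvG (m+1) = true := by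
        simp only [pvG, decide_eq_false_iff_not, decide_eq_true_eq, not_and, not_not] at c3 ⊢
        omega
      rw [hv]
    · have hv : pvG (m+1) = false := by
        simp only [pvG, decide_eq_false_iff_not, not_and, not_not] at c1 c2 c3 ⊢
        omega
      rw [hv]
      exact hset
  rw [key]
  refine ⟨by simp [hlen], ?_, ?_⟩
  · intro j hjm
    rw [Array.getElem?_setIfInBounds]
    rcases eq_or_lt_of_le hjm with rfl | hlt
    · rw [if_pos rfl, if_pos (by omega)]
    · rw [if_neg (by omega)]
      exact hj j (by omega)
  · intro j h1 h2
    rw [Array.getElem?_setIfInBounds, if_neg (by omega)]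
    exact hhi j (by omega) h2

-- loop invariant for A's whole DP loop
theorem pvInv (N : Nat) : ∀ m : Nat, 1 ≤ m → m ≤ N →
    (((PySem.List.pyRange 2 ((m:Int)+1) 1).foldl pvALoop (Array.replicate (N+1) false)).size = N+1) ∧
    (∀ j : Nat, j ≤ m → ((PySem.List.pyRange 2 ((m:Int)+1) 1).foldl pvALoop (Array.replicate (N+1) false))[j]? = some (pvG j)) ∧
    (∀ j : Nat, m < j → j < N+1 → ((PySem.List.pyRange 2 ((m:Int)+1) 1).foldl pvALoop (Array.replicate (N+1) false))[j]? = some false) := by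
  intro m
  induction m with
  | zero => omega
  | succ m ih =>
    intro _ hmN
    by_cases hm1 : m = 0
    · subst hm1
      rw [show (((0+1:Nat)):Int) + 1 = 2 by norm_num, PySem.List.pyRange_one_eq_nil le_rfl,
          List.foldl_nil]
      refine ⟨by simp, ?_, ?_⟩
      · intro j hjm
        have hjN : j < N + 1 := by omega
        have hv : pvG j = false := by interval_cases j <;> decide
        simp [hjN, hv]
      · intro j h1 h2
        simp [h2]
    · have hm : 1 ≤ m := by omega
      obtain ⟨ih1, ih2, ih3⟩ := ih hm (by omega)
      rw [show (((m+1:Nat)):Int) + 1 = ((m:Int)+1) + 1 by push_cast; ring,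
          PySem.List.pyRange_one_succ_right (by omega), List.foldl_append, List.foldl_cons,
          List.foldl_nil]
      exact pvStep N m _ hm (by omega) ih1 ih2 ih3

-- B's closed form over Int agrees with pvG on casts of naturals
theorem pvAltG (N : Nat) : es_posible_ganar_con_n_piedras_alt (N : Int) = pvG N := by
  unfold es_posible_ganar_con_n_piedras_alt pvG
  have hm7 : PySem.Int.mod (N:Int) 7 = ((N % 7 : Nat) : Int) := by
    rw [PySem.Int.mod_eq_emod_of_pos (by norm_num)]
    push_cast
    ring
  rw [hm7]
  simp only [decide_eq_decide]
  omega

-- ===== VERDICT (by name: the statement is the Claim_ definition above) =====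
theorem es_posible_ganar_con_n_piedras_spec : Claim_equal_es_posible_ganar_con_n_piedras := by
  intro n _ hpre
  unfold Spec_es_posible_ganar_con_n_piedras
  lift n to Nat using hpre with N
  rw [pvAltG]
  unfold es_posible_ganar_con_n_piedras
  have etn : ((N:Int)+1).toNat = N+1 := by omega
  rcases Nat.eq_zero_or_pos N with rfl | hN
  · norm_num [PySem.List.pyRange_one_eq_nil (by norm_num : (1:Int) ≤ 2), pvG,
      Array.getD_eq_getD_getElem?, Array.getElem?_replicate]
  · obtain ⟨_, h2, _⟩ := pvInv N N hN le_rfl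
    simp only [etn]
    rw [show ((N:Int)).toNat = N by omega, Array.getD_eq_getD_getElem?, h2 N le_rfl]
    rfl
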